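-- pv_equiv track=rewrite | github.com/octaviaguo/Constrained-Labeled-Data-Generation | grid_beam_search/new_grid_beam.py | calc_banned_bad_words_ids
-- ===== SOURCE A (Python) =====
-- from typing import Iterable, List, Optional, Tuple
--
-- def calc_banned_bad_words_ids(prev_input_ids: Iterable[int], bad_words_ids: Iterable[int]) -> Iterable[int]:
--     banned_tokens = []
--
--     def _tokens_match(prev_tokens, tokens):
--         if len(tokens) == 0:
--             # if bad word tokens is just one token always ban it
--             return True
--         if len(tokens) > len(prev_tokens):
--             # if bad word tokens are longer than prev tokens they can't be equal
--             return False
--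
--         if prev_tokens[-len(tokens) :] == tokens:
--             # if tokens match
--             return True
--         else:
--             return False
--
--     for prev_input_ids_slice in prev_input_ids:
--         banned_tokens_slice = []
--
--         for banned_token_seq in bad_words_ids:
--             assert len(banned_token_seq) > 0, "Banned words token sequences {} cannot have an empty list".format(
--                 bad_words_ids
--             )
--
--             if _tokens_match(prev_input_ids_slice, banned_token_seq[:-1]) is False:
--                 # if tokens do not match continue
--                 continue
--
--             banned_tokens_slice.append(banned_token_seq[-1])
--
--         banned_tokens.append(banned_tokens_slice)
--
--     return banned_tokens
-- ===== SOURCE B (Python) =====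
-- def calc_banned_bad_words_ids(prev_input_ids, bad_words_ids):
--     # Index bad words by their prefix (all tokens but the last): prefix -> [(index, last_token)].
--     index = {}
--     for i, seq in enumerate(bad_words_ids):
--         index.setdefault(tuple(seq[:-1]), []).append((i, seq[-1]))
--     max_plen = max((len(seq) - 1 for seq in bad_words_ids), default=0)
--     banned_tokens = []
--     for sl in prev_input_ids:
--         sl = list(sl)
--         n = len(sl)
--         cands = []
--         for L in range(min(max_plen, n) + 1):
--             cands.extend(index.get(tuple(sl[n - L:]), []))
--         cands.sort(key=lambda p: p[0])
--         banned_tokens.append([tok for _, tok in cands])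
--     return banned_tokens
-- ===== Notes on version B (the rewrite author's own statement) =====
-- stated objective: alternative
-- what changed: Instead of testing every bad-word prefix against every slice suffix (nested scans), B builds a dict keyed by prefix tuple once, then per slice hash-looks-up each suffix of length 0..max prefix length and sorts the hits by original index; intended as faster, a timing run measured 1.3x-4.4x depending on input family.
-- outside the precondition, e.g. on calc_banned_bad_words_ids([], [[]]): A returns [], B raises IndexError
import Mathlib
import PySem

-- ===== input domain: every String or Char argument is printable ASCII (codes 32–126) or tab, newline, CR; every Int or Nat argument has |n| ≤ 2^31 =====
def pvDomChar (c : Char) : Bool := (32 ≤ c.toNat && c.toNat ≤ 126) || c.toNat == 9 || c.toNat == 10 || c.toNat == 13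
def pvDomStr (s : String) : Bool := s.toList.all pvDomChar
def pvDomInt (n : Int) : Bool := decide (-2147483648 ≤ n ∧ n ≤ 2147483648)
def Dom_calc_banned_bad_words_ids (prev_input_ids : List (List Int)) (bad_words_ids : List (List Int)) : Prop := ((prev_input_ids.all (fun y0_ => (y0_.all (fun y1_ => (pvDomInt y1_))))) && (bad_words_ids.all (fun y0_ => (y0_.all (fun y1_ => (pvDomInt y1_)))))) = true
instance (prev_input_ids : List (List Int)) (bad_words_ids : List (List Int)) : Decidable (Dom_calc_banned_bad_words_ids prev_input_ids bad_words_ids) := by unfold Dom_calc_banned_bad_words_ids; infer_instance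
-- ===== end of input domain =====

-- B replaces A's per-slice scan of all bad words by a dict indexed on the bad-word prefix,
-- looked up once per suffix length of the slice (objective: alternative algorithm, intended as faster;
-- a timing run measured between 1.3x and 4.4x depending on the input family; A's raise on
-- an empty bad-word sequence is excluded by Pre_).

-- ===== PORT A =====
-- _tokens_match(prev_tokens, tokens)
def pvTokensMatch (prev_tokens tokens : List Int) : Bool :=
  if tokens.length = 0 then true
  else if tokens.length > prev_tokens.length then false
  else if PySem.List.slice prev_tokens (some (-(tokens.length : Int))) none == tokens then true
  else false

-- the assert fires only outside Pre_ (an empty banned_token_seq); the port ignores it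
def calc_banned_bad_words_ids (prev_input_ids : List (List Int)) (bad_words_ids : List (List Int)) : List (List Int) :=
  prev_input_ids.foldl (fun banned_tokens prev_input_ids_slice =>
    banned_tokens ++ [bad_words_ids.foldl (fun banned_tokens_slice banned_token_seq =>
      if pvTokensMatch prev_input_ids_slice (PySem.List.slice banned_token_seq none (some (-1))) == false then
        banned_tokens_slice
      else
        banned_tokens_slice ++ [(PySem.List.pyGet? banned_token_seq (-1)).getD 0]) []]) []

-- ===== PORT B =====
def calc_banned_bad_words_ids_alt (prev_input_ids : List (List Int)) (bad_words_ids : List (List Int)) : List (List Int) :=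
  -- index.setdefault(tuple(seq[:-1]), []).append((i, seq[-1]))
  let index : PySem.Dict (List Int) (List (Int × Int)) :=
    (PySem.List.enumerate bad_words_ids 0).foldl
      (fun d p => d.modify (PySem.List.slice p.2 none (some (-1))) []
        (fun l => l ++ [(p.1, (PySem.List.pyGet? p.2 (-1)).getD 0)]))
      PySem.Dict.empty
  let max_plen : Nat := bad_words_ids.foldl (fun m seq => max m (seq.length - 1)) 0
  prev_input_ids.foldl (fun banned_tokens sl =>
    let n := sl.length
    let cands :=
      (PySem.List.pyRange 0 (((min max_plen n + 1 : Nat)) : Int)).foldl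
        (fun acc L => acc ++ index.getD (PySem.List.slice sl (some ((n : Int) - L)) none) []) []
    banned_tokens ++ [(PySem.List.sorted cands (fun p => p.1)).map (fun p => p.2)]) []

-- ===== PRECONDITION & SPEC =====
-- Pre_ excludes bad word lists containing an empty sequence: there Python A raises AssertionError
-- whenever prev_input_ids is non-empty (with empty prev_input_ids the assert is never reached and A
-- returns []), and B's index construction raises IndexError on seq[-1].
def Pre_calc_banned_bad_words_ids (prev_input_ids : List (List Int)) (bad_words_ids : List (List Int)) : Prop :=
  ∀ w ∈ bad_words_ids, w ≠ []
instance (prev_input_ids : List (List Int)) (bad_words_ids : List (List Int)) : Decidable (Pre_calc_banned_bad_words_ids prev_input_ids bad_words_ids) := by unfold Pre_calc_banned_bad_words_ids; infer_instance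
def pvWitness_calc_banned_bad_words_ids : List (List Int) × List (List Int) := ([[1, 2]], [[2, 3], [9]])

def Spec_calc_banned_bad_words_ids (prev_input_ids : List (List Int)) (bad_words_ids : List (List Int)) (out : List (List Int)) : Prop := out = calc_banned_bad_words_ids_alt prev_input_ids bad_words_ids
instance (prev_input_ids : List (List Int)) (bad_words_ids : List (List Int)) (out : List (List Int)) : Decidable (Spec_calc_banned_bad_words_ids prev_input_ids bad_words_ids out) := by unfold Spec_calc_banned_bad_words_ids; infer_instance

-- ===== CLAIM (what is proved, stated in full; the proofs are below) =====
def Claim_equal_calc_banned_bad_words_ids : Prop := ∀ (prev_input_ids : List (List Int)) (bad_words_ids : List (List Int)), Dom_calc_banned_bad_words_ids prev_input_ids bad_words_ids → Pre_calc_banned_bad_words_ids prev_input_ids bad_words_ids → Spec_calc_banned_bad_words_ids prev_input_ids bad_words_ids (calc_banned_bad_words_ids prev_input_ids bad_words_ids)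

-- ===== LEMMAS AND PROOFS =====

-- appending two disjoint filters is a permutation of the filter of the disjunction
lemma pv_filter_disjoint_append_perm {α : Type} (p q : α → Bool) (h : ∀ x, ¬(p x = true ∧ q x = true))
    (l : List α) : (l.filter p ++ l.filter q).Perm (l.filter (fun x => p x || q x)) := by
  induction l with
  | nil => simp
  | cons x l ih =>
    by_cases hp : p x = true
    · have hq : q x = false := by
        rcases Bool.eq_false_or_eq_true (q x) with h' | h'
        · exact absurd ⟨hp, h'⟩ (h x)
        · exact h'
      simpa [hp, hq] using ih.cons x
    · have hp' : p x = false := by simpa using hp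
      by_cases hq : q x = true
      · have : (List.filter p l ++ x :: List.filter q l).Perm
            (x :: List.filter (fun x => p x || q x) l) :=
          (List.perm_middle).trans (ih.cons x)
        simpa [hp', hq] using this
      · have hq' : q x = false := by simpa using hq
        simpa [hp', hq'] using ih

-- flatMap of per-key filters over distinct keys is a permutation of the filter of membership
lemma pv_flatMap_filter_perm {κ α : Type} [BEq κ] [LawfulBEq κ] (ks : List κ) (hk : ks.Nodup)
    (l : List α) (f : α → κ) :
    (ks.flatMap (fun k => l.filter (fun x => f x == k))).Perm
      (l.filter (fun x => ks.contains (f x))) := by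
  induction ks with
  | nil => simp
  | cons k ks ih =>
    have hknot : k ∉ ks := (List.nodup_cons.mp hk).1
    have ih' := ih (List.nodup_cons.mp hk).2
    have hdisj : ∀ x, ¬((f x == k) = true ∧ ks.contains (f x) = true) := by
      intro x ⟨h1, h2⟩
      exact hknot (by simpa [beq_iff_eq.mp h1] using List.contains_iff_mem.mp h2)
    have step1 : ((k :: ks).flatMap (fun k => l.filter (fun x => f x == k))).Perm
        (l.filter (fun x => f x == k) ++ l.filter (fun x => ks.contains (f x))) := by
      simpa using ih'.append_left (l.filter (fun x => f x == k))
    have step2 := pv_filter_disjoint_append_perm (fun x => f x == k)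
      (fun x => ks.contains (f x)) hdisj l
    have step3 : l.filter (fun x => (f x == k) || ks.contains (f x))
        = l.filter (fun x => (k :: ks).contains (f x)) := by
      apply List.filter_congr; intro x _
      simp
    exact step1.trans (step3 ▸ step2)

lemma pv_match_iff (sl t : List Int) (mp : Nat) (ht : t.length ≤ mp) :
    pvTokensMatch sl t
      = ((List.range (min mp sl.length + 1)).map (fun ℓ => sl.drop (sl.length - ℓ))).contains t := by
  unfold pvTokensMatch
  by_cases h0 : t.length = 0
  · have ht0 : t = [] := List.length_eq_zero_iff.mp h0
    have hm : ([] : List Int) ∈ (List.range (min mp sl.length + 1)).map (fun ℓ => sl.drop (sl.length - ℓ)) := by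
      refine List.mem_map.mpr ⟨0, ?_, ?_⟩
      · exact List.mem_range.mpr (by omega)
      · simp
    simp only [ht0, List.length_nil, if_true]
    simp [List.contains_eq_mem]
    exact ⟨0, ⟨Nat.zero_le _, Nat.zero_le _⟩, by omega⟩
  · have h0' : 0 < t.length := Nat.pos_of_ne_zero h0
    by_cases hgt : t.length > sl.length
    · have hnm : t ∉ (List.range (min mp sl.length + 1)).map (fun ℓ => sl.drop (sl.length - ℓ)) := by
        intro hm
        rcases List.mem_map.mp hm with ⟨ℓ, hℓ, he⟩
        have hℓ' := List.mem_range.mp hℓ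
        have : t.length = ℓ := by
          rw [← he]; simp [List.length_drop]; omega
        omega
      simp [h0, hgt, List.contains_eq_mem, hnm]
    · have hle : t.length ≤ sl.length := by omega
      rw [PySem.List.slice_from_neg_natCast sl t.length h0']
      by_cases he : sl.drop (sl.length - t.length) = t
      · have hm : t ∈ (List.range (min mp sl.length + 1)).map (fun ℓ => sl.drop (sl.length - ℓ)) := by
          refine List.mem_map.mpr ⟨t.length, List.mem_range.mpr (by omega), he⟩
        simp [h0, hgt, he, List.contains_eq_mem]
        exact ⟨t.length, ⟨ht, hle⟩, he⟩
      · have hnm : t ∉ (List.range (min mp sl.length + 1)).map (fun ℓ => sl.drop (sl.length - ℓ)) := by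
          intro hm
          rcases List.mem_map.mp hm with ⟨ℓ, hℓ, h3⟩
          have hℓ' := List.mem_range.mp hℓ
          have hl2 : t.length = ℓ := by
            rw [← h3]; simp [List.length_drop]; omega
          exact he (by rw [hl2]; exact h3)
        simp [h0, hgt, he, List.contains_eq_mem, hnm]

lemma pv_keys_nodup (sl : List Int) (mp : Nat) :
    ((List.range (min mp sl.length + 1)).map (fun ℓ => sl.drop (sl.length - ℓ))).Nodup := by
  refine List.Nodup.map_on ?_ (List.nodup_range)
  intro x hx y hy he
  have hx' := List.mem_range.mp hx
  have hy' := List.mem_range.mp hy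
  have := congrArg List.length he
  simp [List.length_drop] at this
  omega

lemma pv_index_getD (bad : List (List Int)) (k : List Int) :
    (((PySem.List.enumerate bad 0).foldl
      (fun d p => d.modify (PySem.List.slice p.2 none (some (-1))) []
        (fun l => l ++ [(p.1, (PySem.List.pyGet? p.2 (-1)).getD 0)]))
      (PySem.Dict.empty : PySem.Dict (List Int) (List (Int × Int)))).getD k [])
    = ((PySem.List.enumerate bad 0).filter
        (fun p => PySem.List.slice p.2 none (some (-1)) == k)).map
        (fun p => (p.1, (PySem.List.pyGet? p.2 (-1)).getD 0)) := by
  have h1 : ((PySem.List.enumerate bad 0).foldl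
      (fun d p => d.modify (PySem.List.slice p.2 none (some (-1))) []
        (fun l => l ++ [(p.1, (PySem.List.pyGet? p.2 (-1)).getD 0)]))
      (PySem.Dict.empty : PySem.Dict (List Int) (List (Int × Int))))
      = (((PySem.List.enumerate bad 0).map
          (fun p => (PySem.List.slice p.2 none (some (-1)),
            (p.1, (PySem.List.pyGet? p.2 (-1)).getD 0)))).foldl
        (fun d q => d.modify q.1 [] (fun l => l ++ [q.2])) PySem.Dict.empty) := by
    rw [List.foldl_map]
  rw [h1, PySem.Dict.getD_foldl_modify_append]
  simp [List.filter_map, List.map_map, Function.comp_def]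

lemma pv_slice_eq (bad : List (List Int)) (sl : List Int) :
    (bad.foldl (fun acc seq =>
      if pvTokensMatch sl (PySem.List.slice seq none (some (-1))) == false then acc
      else acc ++ [(PySem.List.pyGet? seq (-1)).getD 0]) [])
    = ((PySem.List.sorted
        ((PySem.List.pyRange 0 (((min (bad.foldl (fun m seq => max m (seq.length - 1)) 0) sl.length + 1 : Nat)) : Int)).foldl
          (fun acc L => acc ++
            (((PySem.List.enumerate bad 0).foldl
              (fun d p => d.modify (PySem.List.slice p.2 none (some (-1))) []
                (fun l => l ++ [(p.1, (PySem.List.pyGet? p.2 (-1)).getD 0)]))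
              (PySem.Dict.empty : PySem.Dict (List Int) (List (Int × Int)))).getD
              (PySem.List.slice sl (some ((sl.length : Int) - L)) none) [])) [])
        (fun p => p.1)).map (fun p => p.2)) := by
  set mp := bad.foldl (fun m seq => max m (seq.length - 1)) 0 with hmp
  set n := sl.length with hn
  set es := PySem.List.enumerate bad 0 with hes
  set g : Int × List Int → Int × Int := fun p => (p.1, (PySem.List.pyGet? p.2 (-1)).getD 0) with hg
  set M := min mp n + 1 with hM
  set ks := (List.range M).map (fun ℓ => sl.drop (n - ℓ)) with hks
  set target := (es.filter (fun p => pvTokensMatch sl (PySem.List.slice p.2 none (some (-1))))).map g with htarget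
  -- A side: the skip/append loop is filter-then-map
  have hA : (bad.foldl (fun acc seq =>
      if pvTokensMatch sl (PySem.List.slice seq none (some (-1))) == false then acc
      else acc ++ [(PySem.List.pyGet? seq (-1)).getD 0]) [])
      = (bad.filter (fun s => pvTokensMatch sl (PySem.List.slice s none (some (-1))))).map
          (fun s => (PySem.List.pyGet? s (-1)).getD 0) := by
    have hfun : (fun (acc : List Int) (seq : List Int) =>
        if pvTokensMatch sl (PySem.List.slice seq none (some (-1))) == false then acc
        else acc ++ [(PySem.List.pyGet? seq (-1)).getD 0])
        = (fun acc seq => if pvTokensMatch sl (PySem.List.slice seq none (some (-1))) then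
            acc ++ [(PySem.List.pyGet? seq (-1)).getD 0] else acc) := by
      funext acc seq
      cases h : pvTokensMatch sl (PySem.List.slice seq none (some (-1))) <;> simp
    rw [hfun]
    simpa using PySem.List.foldl_append_if
      (fun s => pvTokensMatch sl (PySem.List.slice s none (some (-1))))
      (fun s => (PySem.List.pyGet? s (-1)).getD 0) bad []
  -- B side: the lookup loop is a flatMap over the suffix keys
  have hcands : ((PySem.List.pyRange 0 ((M : Nat) : Int)).foldl
      (fun acc L => acc ++
        ((es.foldl (fun d p => d.modify (PySem.List.slice p.2 none (some (-1))) []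
            (fun l => l ++ [g p])) (PySem.Dict.empty : PySem.Dict (List Int) (List (Int × Int)))).getD
          (PySem.List.slice sl (some ((n : Int) - L)) none) [])) [])
      = ks.flatMap (fun k => (es.filter (fun p => PySem.List.slice p.2 none (some (-1)) == k)).map g) := by
    rw [PySem.List.pyRange_zero_natCast, List.foldl_map, PySem.List.foldl_append_eq_flatMap]
    rw [hks, List.flatMap_map]
    simp only [List.nil_append]
    apply List.flatMap_congr
    intro ℓ hℓ
    have hℓ' : ℓ < M := List.mem_range.mp hℓ
    have hℓn : ℓ ≤ n := by omega
    have h1 : (n : Int) - (ℓ : Int) = ((n - ℓ : Nat) : Int) := by omega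
    rw [h1, PySem.List.slice_from_natCast]
    exact pv_index_getD bad _
  -- cands is a permutation of target
  have hmapflat : ks.flatMap (fun k => (es.filter (fun p => PySem.List.slice p.2 none (some (-1)) == k)).map g)
      = (ks.flatMap (fun k => es.filter (fun p => PySem.List.slice p.2 none (some (-1)) == k))).map g := by
    rw [List.map_flatMap]
  have hnd : ks.Nodup := pv_keys_nodup sl mp
  have hp1 := pv_flatMap_filter_perm ks hnd es (fun p => PySem.List.slice p.2 none (some (-1)))
  have hfc : es.filter (fun p => ks.contains (PySem.List.slice p.2 none (some (-1))))
      = es.filter (fun p => pvTokensMatch sl (PySem.List.slice p.2 none (some (-1)))) := by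
    apply List.filter_congr
    intro p hp
    have hp2 : p.2 ∈ bad := by
      rcases (PySem.List.mem_enumerate_iff bad 0 p).mp hp with ⟨k, hk, hpe⟩
      subst hpe; exact List.getElem_mem hk
    have hlen : (PySem.List.slice p.2 none (some (-1))).length ≤ mp := by
      rw [PySem.List.slice_to_neg_one, List.length_dropLast]
      exact (PySem.List.le_foldl_max_nat bad (fun s => s.length - 1) 0).2 p.2 hp2
    exact (pv_match_iff sl _ mp hlen).symm
  have hperm : target.Perm
      (ks.flatMap (fun k => (es.filter (fun p => PySem.List.slice p.2 none (some (-1)) == k)).map g)) := by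
    rw [hmapflat, htarget, ← hfc]
    exact (List.Perm.map g hp1).symm
  -- target is strictly increasing on first components
  have hpw : target.Pairwise (fun a b => a.1 < b.1) := by
    rw [htarget]
    refine List.Pairwise.map (R := fun (a b : Int × List Int) => a.1 < b.1) g (fun a b h => ?_) (List.Pairwise.filter _ ?_)
    · exact h
    · exact PySem.List.pairwise_lt_enumerate bad 0
  rw [hA, hcands, PySem.List.sorted_eq_of_perm_of_pairwise_lt _ target (fun p => p.1) hperm hpw]
  rw [htarget, List.map_map]
  conv_lhs => rw [← PySem.List.map_snd_enumerate bad 0]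
  rw [List.filter_map, List.map_map]
  rfl

-- ===== VERDICT (by name: the statement is the Claim_ definition above) =====
theorem calc_banned_bad_words_ids_spec : Claim_equal_calc_banned_bad_words_ids := by
  intro prev_input_ids bad_words_ids _ _
  unfold Spec_calc_banned_bad_words_ids calc_banned_bad_words_ids calc_banned_bad_words_ids_alt
  simp only []
  rw [PySem.List.foldl_append_singleton_eq_map, PySem.List.foldl_append_singleton_eq_map]
  simp only [List.nil_append]
  apply List.map_congr_left
  intro sl _
  exact pv_slice_eq bad_words_ids sl
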